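-- pv_equiv track=rewrite | github.com/koraniar/dpkg-list-json | dpkg_list_json.py | parseSoftwareVendor
-- ===== SOURCE A (Python) =====
-- def parseSoftwareVendor(vendor, removeEmail):
--     finalVendors = []
--     if removeEmail:
--         vendors = vendor.replace('\n', '').split('>')
--         for vendorEmail in vendors:
--             finalVendors.append(vendorEmail.split('<')[0])
--         return '|'.join(finalVendors)[:-1]
--     return vendor
-- ===== SOURCE B (Python) =====
-- import re
--
-- def parseSoftwareVendor(vendor, removeEmail):
--     if not removeEmail:
--         return vendor
--     s = vendor.replace('\n', '')
--     s = re.sub(r'<[^>]*', '', s)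
--     return s.replace('>', '|')[:-1]
-- ===== Notes on version B (the rewrite author's own statement) =====
-- stated objective: idiomatic
-- what changed: Replaces the split-on-'>' loop that collects each piece's part before '<' and joins with '|' by a single global regex substitution re.sub(r'<[^>]*', '', s) followed by replace('>', '|') and the same [:-1] trim.
import Mathlib
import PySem

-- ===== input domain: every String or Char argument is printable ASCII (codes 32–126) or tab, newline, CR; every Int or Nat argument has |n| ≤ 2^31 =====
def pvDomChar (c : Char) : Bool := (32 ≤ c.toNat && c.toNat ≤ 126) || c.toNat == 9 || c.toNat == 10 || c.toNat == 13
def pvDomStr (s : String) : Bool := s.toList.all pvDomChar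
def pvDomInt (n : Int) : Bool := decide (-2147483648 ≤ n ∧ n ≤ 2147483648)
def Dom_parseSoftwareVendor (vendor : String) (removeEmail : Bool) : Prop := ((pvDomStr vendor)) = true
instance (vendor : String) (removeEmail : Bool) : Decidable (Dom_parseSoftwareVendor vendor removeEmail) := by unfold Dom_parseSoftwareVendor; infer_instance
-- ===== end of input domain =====

-- B replaces A's split-loop-join with a global "delete '<'…up-to-'>'" substitution plus a character replace (objective: idiomatic); same return value everywhere.

-- ===== PORT A =====
def parseSoftwareVendor (vendor : String) (removeEmail : Bool) : String :=
  if removeEmail then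
    -- vendor.replace('\n','').split('>'): the separator ">" is non-empty, so split? is `some` and `.getD []` is unreachable
    let vendors : List String := (PySem.Str.split? (PySem.Str.replace vendor "\n" "") ">").getD []
    -- vendorEmail.split('<')[0]: split with a non-empty separator always yields a non-empty list, so [0] is its head
    let finalVendors : List String :=
      vendors.foldl (fun acc ve => acc ++ [((PySem.Str.split? ve "<").getD []).headD ""]) []
    PySem.Str.slice (PySem.Str.join "|" finalVendors) none (some (-1))
  else vendor

-- ===== PORT B =====
-- hand port of Source B's re.sub(r'<[^>]*', '', s): exact for this pattern — each '<' and the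
-- maximal run of non-'>' characters after it is deleted, everything else is kept
def stripEmails : List Char → List Char
  | [] => []
  | c :: rest =>
      if c = '<' then stripEmails (List.dropWhile (fun x => x != '>') rest)
      else c :: stripEmails rest
termination_by l => l.length
decreasing_by
  · have := List.length_dropWhile_le (fun x => x != '>') rest
    simp only [List.length_cons]; omega
  · simp

def parseSoftwareVendor_alt (vendor : String) (removeEmail : Bool) : String :=
  if !removeEmail then vendor
  else
    let s : List Char := (PySem.Str.replace vendor "\n" "").toList
    let t : List Char := stripEmails s
    String.ofList (PySem.Chars.slice (PySem.Chars.replace t ['>'] ['|']) none (some (-1)))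

-- ===== PRECONDITION & SPEC =====
def Spec_parseSoftwareVendor (vendor : String) (removeEmail : Bool) (out : String) : Prop := out = parseSoftwareVendor_alt vendor removeEmail
instance (vendor : String) (removeEmail : Bool) (out : String) : Decidable (Spec_parseSoftwareVendor vendor removeEmail out) := by unfold Spec_parseSoftwareVendor; infer_instance

-- ===== CLAIM (what is proved, stated in full; the proofs are below) =====
def Claim_equal_parseSoftwareVendor : Prop := ∀ (vendor : String) (removeEmail : Bool), Dom_parseSoftwareVendor vendor removeEmail → Spec_parseSoftwareVendor vendor removeEmail (parseSoftwareVendor vendor removeEmail)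

-- ===== LEMMAS AND PROOFS =====

-- reference single-character splitter: splitC s l = the pieces of l between occurrences of s
def prependHead (p : List Char) : List (List Char) → List (List Char)
  | [] => [p]
  | h :: t => (p ++ h) :: t

def splitC (s : Char) : List Char → List (List Char)
  | [] => [[]]
  | c :: rest => if c = s then [] :: splitC s rest else prependHead [c] (splitC s rest)

theorem prependHead_prependHead (p q : List Char) (X : List (List Char)) :
    prependHead p (prependHead q X) = prependHead (p ++ q) X := by
  cases X <;> simp [prependHead]

theorem prependHead_nil {X : List (List Char)} (h : X ≠ []) : prependHead [] X = X := by
  cases X with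
  | nil => exact absurd rfl h
  | cons a t => simp [prependHead]

theorem splitC_ne_nil (s : Char) (l : List Char) : splitC s l ≠ [] := by
  cases l with
  | nil => simp [splitC]
  | cons c rest =>
      simp only [splitC]
      split
      · simp
      · cases h : splitC s rest <;> simp [prependHead]

theorem splitOn_go_single (s : Char) : ∀ (l : List Char) (fuel : Nat) (cur : List Char)
    (acc : List (List Char)), l.length < fuel →
    PySem.Chars.splitOn.go [s] fuel l cur acc = acc.reverse ++ prependHead cur.reverse (splitC s l) := by
  intro l
  induction l with
  | nil =>
      intro fuel cur acc h
      obtain ⟨f, rfl⟩ : ∃ f, fuel = f + 1 := ⟨fuel - 1, by omega⟩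
      simp [PySem.Chars.splitOn.go, splitC, prependHead]
  | cons c rest ih =>
      intro fuel cur acc h
      obtain ⟨f, rfl⟩ : ∃ f, fuel = f + 1 := ⟨fuel - 1, by omega⟩
      have hf : rest.length < f := by simpa using h
      by_cases hc : c = s
      · subst hc
        have hpre : List.isPrefixOf [c] (c :: rest) = true := by simp [List.isPrefixOf]
        simp only [PySem.Chars.splitOn.go, hpre, if_true, List.length_cons, List.drop_succ_cons,
          List.length_nil, List.drop_zero]
        rw [ih f [] (cur.reverse :: acc) hf]
        simp only [splitC, List.reverse_cons, List.append_assoc]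
        cases hsp : splitC c rest with
        | nil => exact absurd hsp (splitC_ne_nil _ _)
        | cons a t => simp [prependHead]
      · have hpre : List.isPrefixOf [s] (c :: rest) = false := by
          simp [List.isPrefixOf, Ne.symm hc]
        simp only [PySem.Chars.splitOn.go, hpre, Bool.false_eq_true, if_false]
        rw [ih f (c :: cur) acc hf]
        simp [splitC, hc, ← prependHead_prependHead]

theorem splitOn_single (s : Char) (l : List Char) :
    PySem.Chars.splitOn l [s] = splitC s l := by
  unfold PySem.Chars.splitOn
  rw [splitOn_go_single s l (l.length + 1) [] [] (by omega)]
  simp [prependHead_nil (splitC_ne_nil s l)]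

theorem replace_go_single (c d : Char) : ∀ (l : List Char) (fuel : Nat) (acc : List Char),
    l.length ≤ fuel →
    PySem.Chars.replace.go [c] [d] fuel l acc
      = acc.reverse ++ l.map (fun x => if x = c then d else x) := by
  intro l
  induction l with
  | nil =>
      intro fuel acc _
      cases fuel <;> simp [PySem.Chars.replace.go]
  | cons x t ih =>
      intro fuel acc h
      obtain ⟨f, rfl⟩ : ∃ f, fuel = f + 1 := ⟨fuel - 1, by simp at h; omega⟩
      have hf : t.length ≤ f := by simpa using h
      by_cases hx : x = c
      · subst hx
        have hpre : List.isPrefixOf [x] (x :: t) = true := by simp [List.isPrefixOf]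
        simp only [PySem.Chars.replace.go, hpre, if_true, List.length_cons, List.drop_succ_cons,
          List.length_nil, List.drop_zero]
        rw [ih f ([d].reverse ++ acc) hf]
        simp
      · have hpre : List.isPrefixOf [c] (x :: t) = false := by
          simp [List.isPrefixOf, Ne.symm hx]
        simp only [PySem.Chars.replace.go, hpre, Bool.false_eq_true, if_false]
        rw [ih f (x :: acc) hf]
        simp [hx]

theorem replace_single (l : List Char) (c d : Char) :
    PySem.Chars.replace l [c] [d] = l.map (fun x => if x = c then d else x) := by
  unfold PySem.Chars.replace
  rw [if_neg (by simp), replace_go_single c d l l.length [] le_rfl]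
  simp

theorem headD_splitC (c : Char) (v : List Char) :
    (splitC c v).headD [] = v.takeWhile (fun x => x != c) := by
  induction v with
  | nil => simp [splitC]
  | cons x r ih =>
      by_cases hx : x = c
      · subst hx; simp [splitC]
      · cases hsp : splitC c r with
        | nil => exact absurd hsp (splitC_ne_nil c r)
        | cons h t =>
            rw [hsp] at ih
            simp only [List.headD_cons] at ih
            simp [splitC, hx, hsp, prependHead, ih]

theorem splitC_no_sep (s : Char) (w : List Char) (h : ∀ x ∈ w, x ≠ s) :
    splitC s w = [w] := by
  induction w with
  | nil => simp [splitC]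
  | cons x w' ih =>
      have hx : x ≠ s := h x (by simp)
      rw [splitC, if_neg hx, ih (fun y hy => h y (by simp [hy]))]
      simp [prependHead]

theorem splitC_append_no_sep (s : Char) (w rest : List Char) (h : ∀ x ∈ w, x ≠ s) :
    splitC s (w ++ s :: rest) = w :: splitC s rest := by
  induction w with
  | nil => simp [splitC]
  | cons x w' ih =>
      have hx : x ≠ s := h x (by simp)
      rw [List.cons_append, splitC, if_neg hx, ih (fun y hy => h y (by simp [hy]))]
      simp [prependHead]

theorem join_cons_head (sep : List Char) (c : Char) (x : List Char) (t : List (List Char)) :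
    PySem.Chars.join sep ((c :: x) :: t) = c :: PySem.Chars.join sep (x :: t) := by
  cases t with
  | nil => simp [PySem.Chars.join_singleton]
  | cons y t' => simp [PySem.Chars.join_cons_cons]

theorem join_nonempty_cons (X : List (List Char)) (hX : X ≠ []) :
    PySem.Chars.join ['|'] ([] :: X) = '|' :: PySem.Chars.join ['|'] X := by
  cases X with
  | nil => exact absurd rfl hX
  | cons y t => simp [PySem.Chars.join_cons_cons]

-- the heart of the equivalence: A's per-piece head-before-'<' join equals B's scan
theorem main_aux : ∀ (n : Nat) (cs : List Char), cs.length ≤ n →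
    PySem.Chars.join ['|'] ((splitC '>' cs).map (fun v => v.takeWhile (fun x => x != '<')))
      = (stripEmails cs).map (fun x => if x = '>' then '|' else x) := by
  intro n
  induction n with
  | zero =>
      intro cs h
      have : cs = [] := List.length_eq_zero_iff.mp (Nat.le_zero.mp h)
      subst this
      simp [splitC, stripEmails, PySem.Chars.join_singleton]
  | succ n ih =>
      intro cs h
      cases cs with
      | nil => simp [splitC, stripEmails, PySem.Chars.join_singleton]
      | cons c r =>
        have hr : r.length ≤ n := by simpa using h
        by_cases hgt : c = '>'
        · subst hgt
          rw [splitC, if_pos rfl, List.map_cons, List.takeWhile_nil,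
            join_nonempty_cons _ (by simp [splitC_ne_nil]), ih r hr]
          rw [stripEmails, if_neg (by decide)]
          simp
        · by_cases hlt : c = '<'
          · subst hlt
            have hw : ∀ x ∈ List.takeWhile (fun x => x != '>') r, x ≠ '>' := by
              intro x hx
              simpa using List.mem_takeWhile_imp hx
            cases hd : List.dropWhile (fun x => x != '>') r with
            | nil =>
                have hall : ∀ x ∈ r, x ≠ '>' := by
                  intro x hx
                  simpa using List.dropWhile_eq_nil_iff.mp hd x hx
                rw [splitC, if_neg (by decide), splitC_no_sep '>' r hall]
                rw [stripEmails, if_pos rfl, hd, stripEmails]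
                simp [prependHead, PySem.Chars.join_singleton]
            | cons dch rest' =>
                have hdch : dch = '>' := by
                  have hne : List.dropWhile (fun x => x != '>') r ≠ [] := by simp [hd]
                  have h2 := List.head_dropWhile_not (fun x => x != '>') hne
                  simp only [hd, List.head_cons] at h2
                  simpa using h2
                subst hdch
                have hsplit : List.takeWhile (fun x => x != '>') r ++ '>' :: rest' = r := by
                  rw [← hd]; exact List.takeWhile_append_dropWhile
                have hlen : rest'.length ≤ n := by
                  have := List.length_dropWhile_le (fun x => x != '>') r
                  rw [hd] at this
                  simp only [List.length_cons] at this
                  omega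
                rw [stripEmails, if_pos rfl, hd, stripEmails, if_neg (by decide)]
                rw [splitC, if_neg (by decide), ← hsplit,
                  splitC_append_no_sep '>' _ rest' hw]
                simp only [prependHead, List.singleton_append, List.map_cons,
                  List.takeWhile_cons, show (('<' : Char) != '<') = false from rfl,
                  Bool.false_eq_true, if_false]
                rw [join_nonempty_cons _ (by simp [splitC_ne_nil]), ih rest' hlen]
                simp
          · cases hsp : splitC '>' r with
            | nil => exact absurd hsp (splitC_ne_nil '>' r)
            | cons hpiece t =>
                rw [splitC, if_neg hgt, hsp]
                simp only [prependHead, List.singleton_append, List.map_cons,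
                  List.takeWhile_cons]
                rw [if_pos (by simpa using hlt), join_cons_head]
                rw [stripEmails, if_neg hlt, List.map_cons, if_neg hgt]
                have := ih r hr
                rw [hsp] at this
                simp only [List.map_cons] at this
                rw [this]

-- toList of A's inner "split('<')[0]"
theorem inner_head_toList (ve : String) :
    (((PySem.Str.split? ve "<").getD []).headD "").toList
      = ve.toList.takeWhile (fun x => x != '<') := by
  have hb := PySem.Str.split?_map ve "<"
  cases hL : PySem.Str.split? ve "<" with
  | none =>
      rw [hL] at hb
      simp [PySem.Chars.split?, show ("<" : String).toList = ['<'] from rfl] at hb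
  | some L =>
      rw [hL] at hb
      rw [show ("<" : String).toList = ['<'] from rfl, PySem.Chars.split?] at hb
      rw [if_neg (by simp)] at hb
      simp only [Option.map_some, Option.some.injEq] at hb
      rw [splitOn_single] at hb
      cases L with
      | nil => exact absurd hb.symm (by simpa using splitC_ne_nil '<' ve.toList)
      | cons a t =>
          simp only [List.map_cons] at hb
          have hhead : a.toList = (splitC '<' ve.toList).headD [] := by rw [← hb]; simp
          rw [Option.getD_some, List.headD_cons, hhead, headD_splitC]

-- ===== VERDICT (by name: the statement is the Claim_ definition above) =====
theorem ofList_eq_of_toList_eq {s : String} {l : List Char} (h : s.toList = l) :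
    s = String.ofList l := by rw [← h, String.ofList_toList]

set_option maxHeartbeats 1000000 in
theorem parseSoftwareVendor_spec : Claim_equal_parseSoftwareVendor := by
  unfold Claim_equal_parseSoftwareVendor Spec_parseSoftwareVendor
  intro vendor removeEmail _
  cases removeEmail with
  | false => rfl
  | true =>
    have hA : parseSoftwareVendor vendor true =
        PySem.Str.slice (PySem.Str.join "|"
          (((PySem.Str.split? (PySem.Str.replace vendor "\n" "") ">").getD []).foldl
            (fun acc ve => acc ++ [((PySem.Str.split? ve "<").getD []).headD ""]) []))
          none (some (-1)) := rfl
    have hB : parseSoftwareVendor_alt vendor true =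
        String.ofList (PySem.Chars.slice (PySem.Chars.replace
          (stripEmails (PySem.Str.replace vendor "\n" "").toList) ['>'] ['|'])
          none (some (-1))) := rfl
    rw [hA, hB]
    apply ofList_eq_of_toList_eq
    rw [PySem.Str.slice_to_neg_one, PySem.Chars.slice_eq_listSlice, PySem.List.slice_to_neg_one]
    refine congrArg List.dropLast ?_
    -- both sides before [:-1]
    rw [PySem.Str.toList_join, show ("|" : String).toList = ['|'] from rfl]
    rw [PySem.List.foldl_append_singleton_eq_map, List.nil_append, List.map_map]
    have hb := PySem.Str.split?_map (PySem.Str.replace vendor "\n" "") ">"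
    cases hV : PySem.Str.split? (PySem.Str.replace vendor "\n" "") ">" with
    | none =>
        rw [hV] at hb
        simp [PySem.Chars.split?, show (">" : String).toList = ['>'] from rfl] at hb
    | some V =>
        rw [hV] at hb
        rw [show (">" : String).toList = ['>'] from rfl, PySem.Chars.split?] at hb
        rw [if_neg (by simp)] at hb
        simp only [Option.map_some, Option.some.injEq] at hb
        rw [splitOn_single] at hb
        rw [Option.getD_some]
        have hmap : V.map (String.toList ∘ fun ve => ((PySem.Str.split? ve "<").getD []).headD "")
            = (splitC '>' (PySem.Str.replace vendor "\n" "").toList).map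
                (fun v => v.takeWhile (fun x => x != '<')) := by
          rw [← hb, List.map_map]
          apply List.map_congr_left
          intro ve _
          exact inner_head_toList ve
        rw [hmap, main_aux (PySem.Str.replace vendor "\n" "").toList.length _ le_rfl,
          replace_single]
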